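-- pv_equiv track=rewrite | github.com/peterkeres/Python-Examples | project 3/BookFileReader.py | wanteddate
-- ===== SOURCE A (Python) =====
-- def wanteddate(inputdate, filesplit):
--     # getting the data i want
--     userdate1 = inputdate[0]
--     userdate2 = inputdate[1]
--     alldates = filesplit[0]
--     allbooks = filesplit[1]
--     wanteddates = []
--     wantedbooks = []
--     wanteddatesflip = []
--     wantedbooksflip = []
--
--     for i in range(0, len(filesplit[0]), 1):
--         if userdate1 <= alldates[i] and alldates[i] <= userdate2:
--             wanteddates.append(alldates[i])
--             wantedbooks.append(allbooks[i])
--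
--     # flipping the list around
--     for j in range(len(wanteddates) - 1, -1, -1):
--         wanteddatesflip.append(wanteddates[j])
--         wantedbooksflip.append(wantedbooks[j])
--
--     dataneed = [wanteddatesflip, wantedbooksflip]
--     return dataneed
-- ===== SOURCE B (Python) =====
-- def wanteddate(inputdate, filesplit):
--     # divide and conquer: split the index range, solve each half, and glue
--     # right-half result before left-half result, which yields the reversed order directly
--     userdate1 = inputdate[0]
--     userdate2 = inputdate[1]
--     alldates = filesplit[0]
--     allbooks = filesplit[1]
--
--     def solve(a, b):
--         # reversed filtered (dates, books) of indices in [a, b)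
--         if b - a == 0:
--             return [], []
--         if b - a == 1:
--             d = alldates[a]
--             if userdate1 <= d and d <= userdate2:
--                 return [d], [allbooks[a]]
--             return [], []
--         mid = (a + b) // 2
--         ld, lb = solve(a, mid)
--         rd, rb = solve(mid, b)
--         return rd + ld, rb + lb
--
--     rd, rb = solve(0, len(alldates))
--     return [rd, rb]
-- ===== Notes on version B (the rewrite author's own statement) =====
-- stated objective: alternative
-- what changed: Replaces A's forward filter pass into two temporary lists plus a second index-based reversal pass by a divide-and-conquer recursion on the index range that solves each half and concatenates the right half's result before the left's, producing the reversed order directly with no temporaries.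
import Mathlib
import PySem

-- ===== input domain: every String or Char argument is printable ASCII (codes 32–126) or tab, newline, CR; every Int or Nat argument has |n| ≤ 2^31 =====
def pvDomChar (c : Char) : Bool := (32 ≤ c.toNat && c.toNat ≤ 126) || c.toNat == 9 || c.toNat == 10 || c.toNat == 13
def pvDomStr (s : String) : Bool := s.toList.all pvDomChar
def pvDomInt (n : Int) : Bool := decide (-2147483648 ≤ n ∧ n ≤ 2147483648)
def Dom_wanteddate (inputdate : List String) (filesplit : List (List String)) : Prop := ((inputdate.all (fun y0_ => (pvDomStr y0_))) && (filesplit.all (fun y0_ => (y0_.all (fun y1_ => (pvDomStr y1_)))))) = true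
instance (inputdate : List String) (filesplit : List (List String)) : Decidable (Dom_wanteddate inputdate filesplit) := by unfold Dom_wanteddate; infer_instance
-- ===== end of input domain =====

-- B replaces A's forward filter pass plus a separate index-based reversal pass by a
-- divide-and-conquer recursion on the index range (right half's result glued before
-- the left's, yielding the reversed order directly); alternative, not faster.


-- ===== PORT A =====
def wanteddate (inputdate : List String) (filesplit : List (List String)) : List (List String) :=
  let userdate1 := PySem.List.pyGetD inputdate 0 ""
  let userdate2 := PySem.List.pyGetD inputdate 1 ""
  let alldates := PySem.List.pyGetD filesplit 0 []
  let allbooks := PySem.List.pyGetD filesplit 1 []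
  -- first loop: forward filter into the pair (wanteddates, wantedbooks)
  let w := (PySem.List.pyRange 0 (alldates.length : Int) 1).foldl
    (fun (acc : List String × List String) i =>
      if userdate1.toList ≤ (PySem.List.pyGetD alldates i "").toList ∧ (PySem.List.pyGetD alldates i "").toList ≤ userdate2.toList then
        (acc.1 ++ [PySem.List.pyGetD alldates i ""], acc.2 ++ [PySem.List.pyGetD allbooks i ""])
      else acc) ([], [])
  -- second loop: flipping the lists around by index
  let f := (PySem.List.pyRange ((w.1.length : Int) - 1) (-1) (-1)).foldl
    (fun (acc : List String × List String) j =>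
      (acc.1 ++ [PySem.List.pyGetD w.1 j ""], acc.2 ++ [PySem.List.pyGetD w.2 j ""])) ([], [])
  [f.1, f.2]

-- ===== PORT B =====
-- Source B's inner 'solve(a, b)': reversed filtered (dates, books) of the index range [a, b);
-- the indices are nonnegative throughout, so they are carried as Nat ((a+b)//2 = Nat division)
def pvSolve (userdate1 userdate2 : String) (alldates allbooks : List String) (a b : Nat) :
    List String × List String :=
  if b - a = 0 then ([], [])
  else if b - a = 1 then
    let d := PySem.List.pyGetD alldates (a : Int) ""
    if userdate1.toList ≤ d.toList ∧ d.toList ≤ userdate2.toList then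
      ([d], [PySem.List.pyGetD allbooks (a : Int) ""])
    else ([], [])
  else
    let mid := (a + b) / 2
    let l := pvSolve userdate1 userdate2 alldates allbooks a mid
    let r := pvSolve userdate1 userdate2 alldates allbooks mid b
    (r.1 ++ l.1, r.2 ++ l.2)
termination_by b - a
decreasing_by all_goals omega

def wanteddate_alt (inputdate : List String) (filesplit : List (List String)) : List (List String) :=
  let userdate1 := PySem.List.pyGetD inputdate 0 ""
  let userdate2 := PySem.List.pyGetD inputdate 1 ""
  let alldates := PySem.List.pyGetD filesplit 0 []
  let allbooks := PySem.List.pyGetD filesplit 1 []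
  let r := pvSolve userdate1 userdate2 alldates allbooks 0 alldates.length
  [r.1, r.2]

-- ===== PRECONDITION & SPEC =====
-- Pre_ excludes exactly the inputs on which Python A raises IndexError: fewer than two user
-- dates, fewer than two columns in filesplit, or a date in range whose book index is missing.
def Pre_wanteddate (inputdate : List String) (filesplit : List (List String)) : Prop :=
  2 ≤ inputdate.length ∧ 2 ≤ filesplit.length ∧
  ∀ i < (filesplit.getD 0 []).length,
    ((inputdate.getD 0 "").toList ≤ ((filesplit.getD 0 []).getD i "").toList ∧
     ((filesplit.getD 0 []).getD i "").toList ≤ (inputdate.getD 1 "").toList) →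
    i < (filesplit.getD 1 []).length
instance (inputdate : List String) (filesplit : List (List String)) : Decidable (Pre_wanteddate inputdate filesplit) := by unfold Pre_wanteddate; infer_instance

def pvWitness_wanteddate : List String × List (List String) :=
  (["2001", "2005"], [["2000", "2003", "2007"], ["book a", "book b", "book c"]])

def Spec_wanteddate (inputdate : List String) (filesplit : List (List String)) (out : List (List String)) : Prop := out = wanteddate_alt inputdate filesplit
instance (inputdate : List String) (filesplit : List (List String)) (out : List (List String)) : Decidable (Spec_wanteddate inputdate filesplit out) := by unfold Spec_wanteddate; infer_instance

-- ===== CLAIM (what is proved, stated in full; the proofs are below) =====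
def Claim_equal_wanteddate : Prop := ∀ (inputdate : List String) (filesplit : List (List String)), Dom_wanteddate inputdate filesplit → Pre_wanteddate inputdate filesplit → Spec_wanteddate inputdate filesplit (wanteddate inputdate filesplit)

-- ===== LEMMAS AND PROOFS =====

-- Prop-test variant of PySem.List.foldl_append_if (which takes a Bool test)
theorem foldl_append_ite {α : Type} (p : Int → Prop) [DecidablePred p] (f : Int → α)
    (L : List Int) (a : List α) :
    L.foldl (fun s e => if p e then s ++ [f e] else s) a
      = a ++ (L.filter (fun i => decide (p i))).map f := by
  induction L generalizing a with
  | nil => simp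
  | cons x t ih => by_cases h : p x <;> simp [h, ih]

-- A pair-valued fold that conditionally appends to both components is two independent
-- filtered-map folds.
theorem pairFoldFilter {α : Type} (p : Int → Prop) [DecidablePred p] (f g : Int → α)
    (L : List Int) (a b : List α) :
    L.foldl (fun acc i => if p i then (acc.1 ++ [f i], acc.2 ++ [g i]) else acc) (a, b)
      = (a ++ (L.filter (fun i => decide (p i))).map f,
         b ++ (L.filter (fun i => decide (p i))).map g) := by
  have h : (fun (acc : List α × List α) i =>
        if p i then (acc.1 ++ [f i], acc.2 ++ [g i]) else acc)
      = (fun acc i => (if p i then acc.1 ++ [f i] else acc.1,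
                       if p i then acc.2 ++ [g i] else acc.2)) := by
    funext acc i; split_ifs <;> rfl
  rw [h, PySem.List.foldl_prod_mk
        (f := fun s e => if p e then s ++ [f e] else s)
        (g := fun s e => if p e then s ++ [g e] else s),
      Prod.mk.injEq]
  constructor <;> apply foldl_append_ite

-- a pair-valued fold that unconditionally appends to both components is two maps
theorem pairFoldMap {α : Type} (F G : Int → α) (M : List Int) (a b : List α) :
    M.foldl (fun acc j => (acc.1 ++ [F j], acc.2 ++ [G j])) (a, b)
      = (a ++ M.map F, b ++ M.map G) := by
  rw [PySem.List.foldl_prod_mk (f := fun s e => s ++ [F e]) (g := fun s e => s ++ [G e]),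
      Prod.mk.injEq]
  constructor <;> simp only [PySem.List.foldl_append_singleton_eq_map]

-- the countdown range range(n-1, -1, -1) is the reversal of range(0, n)
theorem pyRange_countdown (n : Nat) :
    PySem.List.pyRange ((n : Int) - 1) (-1) (-1)
      = (PySem.List.pyRange 0 (n : Int) 1).reverse := by
  rw [PySem.List.pyRange_neg_one_eq_reverse]
  norm_num

-- A's second loop, read off two equally-long index maps, flips both lists
theorem pairFlip (f g : Int → String) (L : List Int) :
    (PySem.List.pyRange (((L.map f).length : Int) - 1) (-1) (-1)).foldl
      (fun (acc : List String × List String) j =>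
        (acc.1 ++ [PySem.List.pyGetD (L.map f) j ""], acc.2 ++ [PySem.List.pyGetD (L.map g) j ""]))
      ([], []) = ((L.map f).reverse, (L.map g).reverse) := by
  rw [pairFoldMap, pyRange_countdown, Prod.mk.injEq]
  have hlen : (L.map f).length = (L.map g).length := by simp
  constructor
  · rw [List.nil_append, List.map_reverse, PySem.List.map_pyGetD_pyRange_zero']
  · rw [List.nil_append, List.map_reverse, hlen, PySem.List.map_pyGetD_pyRange_zero']

-- the divide-and-conquer recursion computes the reversed filtered maps of its index range
theorem pvSolve_closed (u1 u2 : String) (alldates allbooks : List String) :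
    ∀ (k a b : Nat), b - a = k →
    pvSolve u1 u2 alldates allbooks a b
      = ((((PySem.List.pyRange (a : Int) (b : Int) 1).filter
            (fun i => decide (u1.toList ≤ (PySem.List.pyGetD alldates i "").toList ∧
                              (PySem.List.pyGetD alldates i "").toList ≤ u2.toList))).map
            (fun i => PySem.List.pyGetD alldates i "")).reverse,
         (((PySem.List.pyRange (a : Int) (b : Int) 1).filter
            (fun i => decide (u1.toList ≤ (PySem.List.pyGetD alldates i "").toList ∧
                              (PySem.List.pyGetD alldates i "").toList ≤ u2.toList))).map
            (fun i => PySem.List.pyGetD allbooks i "")).reverse) := by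
  intro k
  induction k using Nat.strong_induction_on with
  | _ k ih =>
    intro a b hk
    unfold pvSolve
    by_cases h0 : b - a = 0
    · have hba : (b : Int) ≤ (a : Int) := by exact_mod_cast Nat.le_of_sub_eq_zero h0
      rw [if_pos h0, PySem.List.pyRange_one_eq_nil hba]
      simp
    · by_cases h1 : b - a = 1
      · have hb : (b : Int) = (a : Int) + 1 := by
          have : b = a + 1 := by omega
          simp [this]
        rw [if_neg h0, if_pos h1, hb, PySem.List.pyRange_one_singleton, List.filter_singleton]
        dsimp only
        by_cases hp : u1.toList ≤ (PySem.List.pyGetD alldates (a : Int) "").toList ∧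
            (PySem.List.pyGetD alldates (a : Int) "").toList ≤ u2.toList
        · have hd : decide (u1.toList ≤ (PySem.List.pyGetD alldates (a : Int) "").toList ∧
              (PySem.List.pyGetD alldates (a : Int) "").toList ≤ u2.toList) = true := by
            simpa using hp
          rw [if_pos hp, hd]
          simp
        · have hd : decide (u1.toList ≤ (PySem.List.pyGetD alldates (a : Int) "").toList ∧
              (PySem.List.pyGetD alldates (a : Int) "").toList ≤ u2.toList) = false := by
            simpa using hp
          rw [if_neg hp, hd]
          simp
      · rw [if_neg h0, if_neg h1]
        have hmid1 : a ≤ (a + b) / 2 := by omega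
        have hmid2 : (a + b) / 2 ≤ b := by omega
        have e1 := ih ((a + b) / 2 - a) (by omega) a ((a + b) / 2) rfl
        have e2 := ih (b - (a + b) / 2) (by omega) ((a + b) / 2) b rfl
        simp only [e1, e2]
        rw [PySem.List.pyRange_one_append (a : Int) (((a + b) / 2 : Nat) : Int) (b : Int)
              (by exact_mod_cast hmid1) (by exact_mod_cast hmid2)]
        simp

-- ===== VERDICT (by name: the statement is the Claim_ definition above) =====
theorem wanteddate_spec : Claim_equal_wanteddate := by
  intro inputdate filesplit _ _
  unfold Spec_wanteddate wanteddate wanteddate_alt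
  dsimp only
  rw [pairFoldFilter]
  simp only [List.nil_append]
  rw [pairFlip]
  rw [pvSolve_closed _ _ _ _ ((PySem.List.pyGetD filesplit 0 []).length - 0) 0
        (PySem.List.pyGetD filesplit 0 []).length rfl]
  simp
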